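-- pv_equiv track=rewrite | github.com/anilrcc/financial-dashboard | analyze_new_orders.py | find_longest_periods
-- ===== SOURCE A (Python) =====
-- def find_longest_periods(values):
--     max_growth = 0
--     max_contraction = 0
--     current_growth = 0
--     current_contraction = 0
--
--     for val in values:
--         if val > 0:
--             current_growth += 1
--             current_contraction = 0
--             max_growth = max(max_growth, current_growth)
--         elif val < 0:
--             current_contraction += 1
--             current_growth = 0
--             max_contraction = max(max_contraction, current_contraction)
--         else:
--             current_growth = 0
--             current_contraction = 0
--
--     return max_growth, max_contraction
-- ===== SOURCE B (Python) =====
-- def find_longest_periods(values):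
--     # Phase 1: compress values into maximal runs of equal sign (1, -1 or 0).
--     runs = []
--     for val in values:
--         s = 1 if val > 0 else (-1 if val < 0 else 0)
--         if runs and runs[-1][0] == s:
--             runs[-1][1] += 1
--         else:
--             runs.append([s, 1])
--     # Phase 2: longest run of each sign.
--     max_growth = 0
--     max_contraction = 0
--     for s, n in runs:
--         if s == 1:
--             max_growth = max(max_growth, n)
--         elif s == -1:
--             max_contraction = max(max_contraction, n)
--     return max_growth, max_contraction
-- ===== Notes on version B (the rewrite author's own statement) =====
-- stated objective: alternative
-- what changed: B is a two-phase run-length decomposition: it first compresses the list into maximal runs of equal sign and then takes the longest run of each sign, instead of A's single pass with four running counters and a max update per element.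
import Mathlib
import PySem

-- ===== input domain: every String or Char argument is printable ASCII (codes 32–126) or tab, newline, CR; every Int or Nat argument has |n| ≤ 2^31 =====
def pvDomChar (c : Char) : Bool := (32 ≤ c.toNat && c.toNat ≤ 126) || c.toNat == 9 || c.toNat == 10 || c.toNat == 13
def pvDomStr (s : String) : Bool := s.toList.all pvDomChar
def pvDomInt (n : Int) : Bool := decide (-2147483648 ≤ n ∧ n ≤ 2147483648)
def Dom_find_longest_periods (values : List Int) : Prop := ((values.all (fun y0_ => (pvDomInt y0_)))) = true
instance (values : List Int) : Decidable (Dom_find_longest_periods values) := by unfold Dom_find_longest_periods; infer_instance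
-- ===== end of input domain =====

-- B replaces A's single pass with four running counters by a two-phase run-length
-- decomposition (compress into maximal sign runs, then take the longest run of each sign);
-- objective: alternative (same asymptotic cost, different algorithmic decomposition).


-- ===== PORT A =====
-- one loop step of A: state is (max_growth, max_contraction, current_growth, current_contraction)
def pvAStep (st : Int × Int × Int × Int) (val : Int) : Int × Int × Int × Int :=
  if val > 0 then (max st.1 (st.2.2.1 + 1), st.2.1, st.2.2.1 + 1, 0)
  else if val < 0 then (st.1, max st.2.1 (st.2.2.2 + 1), 0, st.2.2.2 + 1)
  else (st.1, st.2.1, 0, 0)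

def find_longest_periods (values : List Int) : Int × Int :=
  let st := values.foldl pvAStep (0, 0, 0, 0)
  (st.1, st.2.1)

-- ===== PORT B =====
-- sign key: 1 if val > 0, -1 if val < 0, else 0
def pvSign (val : Int) : Int := if val > 0 then 1 else if val < 0 then -1 else 0

-- phase-1 loop step; the run list is kept head-first (Python appends at the end and
-- mutates runs[-1]; here we cons at the head and mutate the head, reversing at the end)
def pvPush (acc : List (Int × Int)) (val : Int) : List (Int × Int) :=
  match acc with
  | (s, n) :: t => if s = pvSign val then (s, n + 1) :: t else (pvSign val, 1) :: (s, n) :: t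
  | [] => [(pvSign val, 1)]

-- phase-2 loop step over the runs
def pvMaxStep (p : Int × Int) (r : Int × Int) : Int × Int :=
  if r.1 = 1 then (max p.1 r.2, p.2) else if r.1 = -1 then (p.1, max p.2 r.2) else p

def find_longest_periods_alt (values : List Int) : Int × Int :=
  ((values.foldl pvPush []).reverse).foldl pvMaxStep (0, 0)

-- ===== PRECONDITION & SPEC =====
def Spec_find_longest_periods (values : List Int) (out : Int × Int) : Prop := out = find_longest_periods_alt values
instance (values : List Int) (out : Int × Int) : Decidable (Spec_find_longest_periods values out) := by unfold Spec_find_longest_periods; infer_instance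

-- ===== CLAIM (what is proved, stated in full; the proofs are below) =====
def Claim_equal_find_longest_periods : Prop := ∀ (values : List Int), Dom_find_longest_periods values → Spec_find_longest_periods values (find_longest_periods values)

-- ===== LEMMAS AND PROOFS =====

-- relation between A's current counters and the head run of B's (reversed) run list
def pvHeadRel (acc : List (Int × Int)) (cg cc : Int) : Prop :=
  match acc with
  | [] => cg = 0 ∧ cc = 0
  | (s, n) :: _ => (s = 1 ∧ cg = n ∧ cc = 0) ∨ (s = -1 ∧ cc = n ∧ cg = 0) ∨ (s = 0 ∧ cg = 0 ∧ cc = 0)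

theorem pv_loop_inv (values : List Int) : ∀ (acc : List (Int × Int)) (mg mc cg cc : Int),
    (mg, mc) = (acc.reverse).foldl pvMaxStep (0, 0) →
    pvHeadRel acc cg cc →
    (((values.foldl pvAStep (mg, mc, cg, cc)).1, (values.foldl pvAStep (mg, mc, cg, cc)).2.1)
      = ((values.foldl pvPush acc).reverse).foldl pvMaxStep (0, 0)) := by
  induction values with
  | nil => intro acc mg mc cg cc h _; simpa using h
  | cons v rest ih =>
    intro acc mg mc cg cc hfold hhead
    simp only [List.foldl_cons]
    rcases acc with _ | ⟨⟨s, n⟩, t⟩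
    · -- empty run list: cg = cc = 0, push starts a new run
      obtain ⟨hcg, hcc⟩ := hhead
      subst hcg hcc
      have hmg : mg = 0 := by simpa using congrArg Prod.fst hfold
      have hmc : mc = 0 := by simpa using congrArg (fun p => p.2) hfold
      subst hmg hmc
      by_cases hv : v > 0
      · have hA : pvAStep (0, 0, 0, 0) v = (max 0 (0 + 1), 0, 0 + 1, 0) := by simp [pvAStep, hv]
        have hP : pvPush [] v = [((1 : Int), (1 : Int))] := by simp [pvPush, pvSign, hv]
        rw [hA, hP]
        refine ih _ _ _ _ _ ?_ ?_
        · simp [pvMaxStep]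
        · simp [pvHeadRel]
      · by_cases hv' : v < 0
        · have hA : pvAStep (0, 0, 0, 0) v = (0, max 0 (0 + 1), 0, 0 + 1) := by
            simp [pvAStep, hv, hv']
          have hP : pvPush [] v = [((-1 : Int), (1 : Int))] := by simp [pvPush, pvSign, hv, hv']
          rw [hA, hP]
          refine ih _ _ _ _ _ ?_ ?_
          · simp [pvMaxStep]
          · simp [pvHeadRel]
        · have hA : pvAStep (0, 0, 0, 0) v = (0, 0, 0, 0) := by simp [pvAStep, hv, hv']
          have hP : pvPush [] v = [((0 : Int), (1 : Int))] := by simp [pvPush, pvSign, hv, hv']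
          rw [hA, hP]
          refine ih _ _ _ _ _ ?_ ?_
          · simp [pvMaxStep]
          · simp [pvHeadRel]
    · -- non-empty run list with head run (s, n)
      have hfold' : (mg, mc) = pvMaxStep ((t.reverse).foldl pvMaxStep (0, 0)) (s, n) := by
        simpa [List.foldl_append] using hfold
      by_cases hv : v > 0
      · have hsgn : pvSign v = 1 := by simp [pvSign, hv]
        have hA : pvAStep (mg, mc, cg, cc) v = (max mg (cg + 1), mc, cg + 1, 0) := by
          simp [pvAStep, hv]
        rcases hhead with ⟨hs, hcg, hcc⟩ | ⟨hs, hcc, hcg⟩ | ⟨hs, hcg, hcc⟩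
        · -- head run positive: extend it
          subst hs
          have hP : pvPush ((1, n) :: t) v = (1, n + 1) :: t := by simp [pvPush, hsgn]
          rw [hA, hP]
          refine ih _ _ _ _ _ ?_ ?_
          · have h1 : mg = max ((t.reverse).foldl pvMaxStep (0, 0)).1 n := by
              simpa [pvMaxStep] using congrArg Prod.fst hfold'
            have h2 : mc = ((t.reverse).foldl pvMaxStep (0, 0)).2 := by
              simpa [pvMaxStep] using congrArg (fun p => p.2) hfold'
            simp only [List.reverse_cons, List.foldl_append, List.foldl_cons, List.foldl_nil]
            refine Prod.ext ?_ ?_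
            · simp [pvMaxStep, h1, hcg]
            · simp [pvMaxStep, h2]
          · simp [pvHeadRel, hcg]
        · -- head run negative: start a fresh positive run (cg = 0)
          subst hs hcg
          have hP : pvPush ((-1, n) :: t) v = (1, 1) :: (-1, n) :: t := by
            simp [pvPush, hsgn]
          rw [hA, hP]
          refine ih _ _ _ _ _ ?_ ?_
          · simp only [List.reverse_cons, List.foldl_append, List.foldl_cons, List.foldl_nil]
            rw [← hfold']
            refine Prod.ext ?_ ?_ <;> simp [pvMaxStep]
          · simp [pvHeadRel]
        · -- head run zero: start a fresh positive run
          subst hs hcg hcc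
          have hP : pvPush ((0, n) :: t) v = (1, 1) :: (0, n) :: t := by simp [pvPush, hsgn]
          rw [hA, hP]
          refine ih _ _ _ _ _ ?_ ?_
          · simp only [List.reverse_cons, List.foldl_append, List.foldl_cons, List.foldl_nil]
            rw [← hfold']
            refine Prod.ext ?_ ?_ <;> simp [pvMaxStep]
          · simp [pvHeadRel]
      · by_cases hv' : v < 0
        · have hsgn : pvSign v = -1 := by simp [pvSign, hv, hv']
          have hA : pvAStep (mg, mc, cg, cc) v = (mg, max mc (cc + 1), 0, cc + 1) := by
            simp [pvAStep, hv, hv']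
          rcases hhead with ⟨hs, hcg, hcc⟩ | ⟨hs, hcc, hcg⟩ | ⟨hs, hcg, hcc⟩
          · -- head run positive: start a fresh negative run (cc = 0)
            subst hs hcc
            have hP : pvPush ((1, n) :: t) v = (-1, 1) :: (1, n) :: t := by
              simp [pvPush, hsgn]
            rw [hA, hP]
            refine ih _ _ _ _ _ ?_ ?_
            · simp only [List.reverse_cons, List.foldl_append, List.foldl_cons, List.foldl_nil]
              rw [← hfold']
              refine Prod.ext ?_ ?_ <;> simp [pvMaxStep]
            · simp [pvHeadRel]
          · -- head run negative: extend it
            subst hs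
            have hP : pvPush ((-1, n) :: t) v = (-1, n + 1) :: t := by simp [pvPush, hsgn]
            rw [hA, hP]
            refine ih _ _ _ _ _ ?_ ?_
            · have h1 : mg = ((t.reverse).foldl pvMaxStep (0, 0)).1 := by
                simpa [pvMaxStep] using congrArg Prod.fst hfold'
              have h2 : mc = max ((t.reverse).foldl pvMaxStep (0, 0)).2 n := by
                simpa [pvMaxStep] using congrArg (fun p => p.2) hfold'
              simp only [List.reverse_cons, List.foldl_append, List.foldl_cons, List.foldl_nil]
              refine Prod.ext ?_ ?_
              · simp [pvMaxStep, h1]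
              · simp [pvMaxStep, h2, hcc]
            · simp [pvHeadRel, hcc]
          · -- head run zero: start a fresh negative run
            subst hs hcg hcc
            have hP : pvPush ((0, n) :: t) v = (-1, 1) :: (0, n) :: t := by simp [pvPush, hsgn]
            rw [hA, hP]
            refine ih _ _ _ _ _ ?_ ?_
            · simp only [List.reverse_cons, List.foldl_append, List.foldl_cons, List.foldl_nil]
              rw [← hfold']
              refine Prod.ext ?_ ?_ <;> simp [pvMaxStep]
            · simp [pvHeadRel]
        · -- v = 0: counters reset
          have hsgn : pvSign v = 0 := by simp [pvSign, hv, hv']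
          have hA : pvAStep (mg, mc, cg, cc) v = (mg, mc, 0, 0) := by simp [pvAStep, hv, hv']
          rcases hhead with ⟨hs, hcg, hcc⟩ | ⟨hs, hcc, hcg⟩ | ⟨hs, hcg, hcc⟩
          · subst hs
            have hP : pvPush ((1, n) :: t) v = (0, 1) :: (1, n) :: t := by simp [pvPush, hsgn]
            rw [hA, hP]
            refine ih _ _ _ _ _ ?_ ?_
            · simp only [List.reverse_cons, List.foldl_append, List.foldl_cons, List.foldl_nil]
              rw [← hfold']
              simp [pvMaxStep]
            · simp [pvHeadRel]
          · subst hs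
            have hP : pvPush ((-1, n) :: t) v = (0, 1) :: (-1, n) :: t := by simp [pvPush, hsgn]
            rw [hA, hP]
            refine ih _ _ _ _ _ ?_ ?_
            · simp only [List.reverse_cons, List.foldl_append, List.foldl_cons, List.foldl_nil]
              rw [← hfold']
              simp [pvMaxStep]
            · simp [pvHeadRel]
          · -- head run zero: extend it (its length does not affect the maxima)
            subst hs
            have hP : pvPush ((0, n) :: t) v = (0, n + 1) :: t := by simp [pvPush, hsgn]
            rw [hA, hP]
            refine ih _ _ _ _ _ ?_ ?_
            · simp only [List.reverse_cons, List.foldl_append, List.foldl_cons, List.foldl_nil]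
              rw [hfold']
              simp [pvMaxStep]
            · simp [pvHeadRel]

-- ===== VERDICT (by name: the statement is the Claim_ definition above) =====
theorem find_longest_periods_spec : Claim_equal_find_longest_periods := by
  intro values _
  unfold Spec_find_longest_periods find_longest_periods find_longest_periods_alt
  exact pv_loop_inv values [] 0 0 0 0 (by simp) (by simp [pvHeadRel])
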